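-- pv_equiv track=rewrite | github.com/KKeshav1101/NPTEL_Getting_Started_with_CP | Week_1/practice_assignment1.py | maximize_score
-- ===== SOURCE A (Python) =====
-- def maximize_score(n):
--     score = 0
--     while n > 1:
--         # Divide the stack into two parts: 1 and (n-1)
--         part1 = 1
--         part2 = n - 1
--         score += part1 * part2
--         # Update n to the new largest stack
--         n = part2
--     return score
-- ===== SOURCE B (Python) =====
-- def maximize_score(n):
--     # Closed form: splitting off 1 each time collects (n-1)+(n-2)+...+1 = n*(n-1)/2.
--     return n * (n - 1) // 2 if n > 1 else 0
-- ===== Notes on version B (the rewrite author's own statement) =====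
-- stated objective: faster
-- what changed: Replaced the while-loop that repeatedly splits off a stack of 1 with the closed form n*(n-1)//2 (guarded to 0 for n<=1).
import Mathlib
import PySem

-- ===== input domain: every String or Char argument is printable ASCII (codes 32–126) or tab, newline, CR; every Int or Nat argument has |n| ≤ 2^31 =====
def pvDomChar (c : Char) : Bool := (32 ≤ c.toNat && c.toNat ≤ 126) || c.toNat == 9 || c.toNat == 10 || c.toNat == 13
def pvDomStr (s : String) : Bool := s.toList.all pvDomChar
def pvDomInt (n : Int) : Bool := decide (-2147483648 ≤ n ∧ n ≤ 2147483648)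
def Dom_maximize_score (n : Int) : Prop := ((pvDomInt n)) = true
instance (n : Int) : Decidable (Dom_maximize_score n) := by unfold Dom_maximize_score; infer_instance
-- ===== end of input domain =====

-- B replaces A's O(n) peel-off-one loop with the closed form n*(n-1)//2 (faster: asymptotic).

-- ===== PORT A =====
-- the while loop: while n > 1: score += 1*(n-1); n := n-1
def maximize_score_loop (n score : Int) : Int :=
  if n > 1 then maximize_score_loop (n - 1) (score + 1 * (n - 1)) else score
termination_by n.toNat
decreasing_by omega

def maximize_score (n : Int) : Int := maximize_score_loop n 0

-- ===== PORT B =====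
def maximize_score_alt (n : Int) : Int :=
  if n > 1 then PySem.Int.floordiv (n * (n - 1)) 2 else 0

-- ===== PRECONDITION & SPEC =====
def Spec_maximize_score (n : Int) (out : Int) : Prop := out = maximize_score_alt n
instance (n : Int) (out : Int) : Decidable (Spec_maximize_score n out) := by unfold Spec_maximize_score; infer_instance

-- ===== CLAIM (what is proved, stated in full; the proofs are below) =====
def Claim_equal_maximize_score : Prop := ∀ (n : Int), Dom_maximize_score n → Spec_maximize_score n (maximize_score n)

-- ===== LEMMAS AND PROOFS =====
theorem pv_floordiv_half_mul_pred (n : Int) :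
    2 * PySem.Int.floordiv (n * (n - 1)) 2 = n * (n - 1) := by
  obtain ⟨k, hk⟩ : Even (n * (n - 1)) := by
    have h := Int.even_mul_succ_self (n - 1)
    simpa [mul_comm] using h
  have hk2 : n * (n - 1) = 2 * k := by omega
  rw [hk2, PySem.Int.floordiv_eq_ediv_of_pos (by norm_num)]
  simp

theorem pv_loop_closed (m : Nat) : ∀ (n score : Int), n.toNat = m →
    maximize_score_loop n score = score + maximize_score_alt n := by
  induction m using Nat.strong_induction_on with
  | _ m ih =>
    intro n score hm
    rw [maximize_score_loop]
    by_cases hn : n > 1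
    · have hrec := ih (n - 1).toNat (by omega) (n - 1) (score + 1 * (n - 1)) rfl
      rw [if_pos hn, hrec]
      unfold maximize_score_alt
      by_cases hn2 : n - 1 > 1
      · rw [if_pos hn2, if_pos hn]
        have h1 := pv_floordiv_half_mul_pred n
        have h2 := pv_floordiv_half_mul_pred (n - 1)
        have hring : n * (n - 1) - (n - 1) * (n - 1 - 1) = 2 * (n - 1) := by ring
        linarith
      · have hn2' : n = 2 := by omega
        subst hn2'
        simp
    · rw [if_neg hn]
      unfold maximize_score_alt
      rw [if_neg hn]
      omega

-- ===== VERDICT (by name: the statement is the Claim_ definition above) =====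
theorem maximize_score_spec : Claim_equal_maximize_score := by
  intro n _
  unfold Spec_maximize_score maximize_score
  have := pv_loop_closed n.toNat n 0 rfl
  omega
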